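-- pv_equiv track=rewrite | github.com/gomeznico/EulerProblems | problem48/problem48.py | truncated_power
-- ===== SOURCE A (Python) =====
-- def truncated_power(n):
--     # return last 15 digits of resulting n^n
--     digits = 11
--     num = 1
--     for _ in range(n):
--         num*=n
--         num =str(num)
--         if len(num)>digits: num = num[-digits:]
--         num = int(num)
--     return num
-- ===== SOURCE B (Python) =====
-- def truncated_power(n):
--     # last 11 digits of n^n, computed by modular exponentiation
--     MOD = 10 ** 11
--     if n <= 0:
--         return 1
--     return pow(n, n, MOD)
-- ===== Notes on version B (the rewrite author's own statement) =====
-- stated objective: faster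
-- what changed: A multiplies n times, converting the running product to a decimal string and keeping the last 11 characters at every step; B computes pow(n, n, 10**11) directly (binary modular exponentiation), with n <= 0 returning 1 exactly as A's empty range(n) loop does.
import Mathlib
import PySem

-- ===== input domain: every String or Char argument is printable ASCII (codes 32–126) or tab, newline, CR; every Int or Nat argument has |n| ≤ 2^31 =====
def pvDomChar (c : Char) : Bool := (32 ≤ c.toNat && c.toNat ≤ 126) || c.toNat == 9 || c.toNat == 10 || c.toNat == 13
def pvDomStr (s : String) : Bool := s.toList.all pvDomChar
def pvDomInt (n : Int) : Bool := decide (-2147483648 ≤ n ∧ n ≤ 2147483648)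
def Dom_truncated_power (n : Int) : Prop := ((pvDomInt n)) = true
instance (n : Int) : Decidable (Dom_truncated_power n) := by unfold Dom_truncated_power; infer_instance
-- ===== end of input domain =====

-- B computes the same last-11-digits value by modular exponentiation instead of
-- A's digit-string truncation loop (return value only; no argument is mutated).

-- ===== PORT A =====
def truncated_power (n : Int) : Int :=
  let digits : Int := 11
  (PySem.List.pyRange 0 n 1).foldl
    (fun num _ =>
      let num := num * n                                      -- num *= n
      let s := PySem.Int.toChars num                          -- num = str(num)
      let s := if digits < PySem.List.len s                   -- if len(num) > digits:
               then PySem.List.slice s (some (-digits)) none  --   num = num[-digits:]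
               else s
      (PySem.Int.ofChars? s).getD 0)                          -- num = int(num)  (never raises here)
    1

-- ===== PORT B =====
def truncated_power_alt (n : Int) : Int :=
  if n ≤ 0 then 1 else PySem.Int.powMod n n.toNat (10 ^ 11)

-- ===== PRECONDITION & SPEC =====
def Spec_truncated_power (n : Int) (out : Int) : Prop := out = truncated_power_alt n
instance (n : Int) (out : Int) : Decidable (Spec_truncated_power n out) := by unfold Spec_truncated_power; infer_instance

-- ===== CLAIM (what is proved, stated in full; the proofs are below) =====
def Claim_equal_truncated_power : Prop := ∀ (n : Int), Dom_truncated_power n → Spec_truncated_power n (truncated_power n)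

-- ===== LEMMAS AND PROOFS =====

theorem digit_cases (c : Char) (h : c.isDigit) :
    c = '0' ∨ c = '1' ∨ c = '2' ∨ c = '3' ∨ c = '4' ∨ c = '5' ∨ c = '6' ∨ c = '7' ∨ c = '8' ∨ c = '9' := by
  simp only [Char.isDigit, decide_eq_true_eq, Bool.and_eq_true] at h
  have hb : 48 ≤ c.toNat ∧ c.toNat ≤ 57 := by
    constructor
    · exact_mod_cast h.1
    · exact_mod_cast h.2
  have h2 : c.toNat = 48 ∨ c.toNat = 49 ∨ c.toNat = 50 ∨ c.toNat = 51 ∨ c.toNat = 52 ∨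
      c.toNat = 53 ∨ c.toNat = 54 ∨ c.toNat = 55 ∨ c.toNat = 56 ∨ c.toNat = 57 := by omega
  rcases h2 with h2|h2|h2|h2|h2|h2|h2|h2|h2|h2 <;>
    (rw [← Char.ofNat_toNat c, h2]; decide)

theorem digit_not_space (c : Char) (h : c.isDigit) : PySem.Int.isIntSpace c = false := by
  simp only [Char.isDigit, decide_eq_true_eq, Bool.and_eq_true] at h
  simp only [PySem.Int.isIntSpace, Bool.or_eq_false_iff, decide_eq_false_iff_not]
  refine ⟨⟨⟨⟨⟨?_, ?_⟩, ?_⟩, ?_⟩, ?_⟩, ?_⟩ <;> (intro he; subst he; simp_all)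

theorem dropWhile_eq_self_of_all {α : Type} (p : α → Bool) (l : List α)
    (h : ∀ x ∈ l, p x = false) : l.dropWhile p = l := by
  cases l with
  | nil => rfl
  | cons a t => rw [List.dropWhile_cons_of_neg]; simp [h a List.mem_cons_self]

/-- decimal digit-char value used by the parse characterisation -/
def pvDigitStep (a : Nat) (x : Char) : Nat := a * 10 + (x.toNat - '0'.toNat)

/-- `int()` on a nonempty all-digit character list returns its MSB-first value.
    The private parser inside `PySem.Int.ofChars?` is captured by unification. -/
theorem ofChars?_digits (c : Char) (ds : List Char)
    (hall : ∀ x ∈ c :: ds, x.isDigit) :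
    PySem.Int.ofChars? (c :: ds) = some (((c :: ds).foldl pvDigitStep 0 : Nat) : Int) := by
  obtain ⟨G, anchor, h_nil, h_digit⟩ :
      ∃ G : List Char → Bool → Nat → Option Nat,
        (∀ (c : Char) (ds : List Char), c.isDigit = true → (∀ x ∈ ds, x.isDigit = true) →
          PySem.Int.ofChars? (c :: ds) =
            Option.map (fun n => (n : Int)) (do let a ← G ds true (0 * 10 + (c.toNat - '0'.toNat)); pure a))
        ∧ (∀ b a, G [] b a = if b = true then some a else none)
        ∧ (∀ c rest b a, c.isDigit = true →
            G (c :: rest) b a = G rest true (a * 10 + (c.toNat - '0'.toNat))) := by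
    apply Exists.intro
    constructor
    case h.left =>
      intro c ds hc h
      have hns : ∀ x ∈ c :: ds, PySem.Int.isIntSpace x = false := by
        intro x hx
        rcases List.mem_cons.mp hx with rfl | hx
        · exact digit_not_space x hc
        · exact digit_not_space x (h x hx)
      rw [PySem.Int.ofChars?.eq_1]
      rw [dropWhile_eq_self_of_all _ _ hns,
          dropWhile_eq_self_of_all _ _ (by simpa using fun x hx => hns x (List.mem_reverse.mp hx)),
          List.reverse_reverse]
      rcases digit_cases c hc with rfl|rfl|rfl|rfl|rfl|rfl|rfl|rfl|rfl|rfl <;> rfl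
    case h.right =>
      constructor
      · intro b a; rfl
      · intro c rest b a hc
        rcases digit_cases c hc with rfl|rfl|rfl|rfl|rfl|rfl|rfl|rfl|rfl|rfl <;> rfl
  have hfold : ∀ (l : List Char), (∀ x ∈ l, x.isDigit) → ∀ a, G l true a = some (l.foldl pvDigitStep a) := by
    intro l
    induction l with
    | nil => intro _ a; simp [h_nil]
    | cons d t ih =>
      intro hl a
      rw [h_digit d t true a (hl d List.mem_cons_self)]
      simpa [pvDigitStep] using ih (fun x hx => hl x (List.mem_cons_of_mem d hx)) _
  rw [anchor c ds (hall c List.mem_cons_self) (fun x hx => hall x (List.mem_cons_of_mem c hx))]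
  rw [hfold ds (fun x hx => hall x (List.mem_cons_of_mem c hx))]
  rfl

/-- core `Nat.toDigits` agrees with Mathlib's `Nat.digits` for positive input -/
theorem toDigitsCore_eq (fuel a : Nat) (ds : List Char) (ha : 0 < a) (hfa : a < 10 ^ fuel) :
    Nat.toDigitsCore 10 fuel a ds = ((Nat.digits 10 a).map Nat.digitChar).reverse ++ ds := by
  induction fuel generalizing a ds with
  | zero => simp at hfa; omega
  | succ f ih =>
    rw [Nat.toDigitsCore]
    by_cases h0 : a / 10 = 0
    · have ha10 : a < 10 := by omega
      rw [if_pos h0, Nat.digits_of_lt 10 a (by omega) ha10, Nat.mod_eq_of_lt ha10]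
      simp
    · rw [if_neg h0]
      rw [ih (a / 10) _ (by omega) (by
        have : a < 10 * 10 ^ f := by rw [pow_succ] at hfa; omega
        omega)]
      rw [Nat.digits_def' (by norm_num : 1 < 10) ha]
      simp

theorem toDigits_pos_eq (a : Nat) (ha : 0 < a) :
    Nat.toDigits 10 a = ((Nat.digits 10 a).map Nat.digitChar).reverse := by
  rw [Nat.toDigits]
  have hpow : a < 10 ^ (a + 1) :=
    lt_of_lt_of_le Nat.lt_two_pow_self
      (le_trans (Nat.pow_le_pow_left (by norm_num) a) (Nat.pow_le_pow_right (by norm_num) (Nat.le_succ a)))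
  rw [toDigitsCore_eq (a + 1) a [] ha hpow]
  simp

theorem digitChar_isDigit (d : Nat) (h : d < 10) : (Nat.digitChar d).isDigit := by
  interval_cases d <;> decide

theorem digitChar_val (d : Nat) (h : d < 10) : (Nat.digitChar d).toNat - '0'.toNat = d := by
  interval_cases d <;> decide

/-- MSB-first fold over reversed digit chars computes `Nat.ofDigits`. -/
theorem foldl_digitChars (ds : List Nat) (hds : ∀ d ∈ ds, d < 10) (a : Nat) :
    ((ds.map Nat.digitChar).reverse).foldl pvDigitStep a = a * 10 ^ ds.length + Nat.ofDigits 10 ds := by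
  induction ds generalizing a with
  | nil => simp
  | cons d t ih =>
    simp only [List.map_cons, List.reverse_cons, List.foldl_append, List.foldl_cons, List.foldl_nil]
    rw [ih (fun x hx => hds x (List.mem_cons_of_mem d hx))]
    rw [Nat.ofDigits_cons]
    simp only [pvDigitStep, digitChar_val d (hds d List.mem_cons_self), List.length_cons]
    ring

/-- one iteration of A's loop body: string truncation to 11 digits is `% 10^11` -/
theorem stepA_eq (m : Int) (hm : 0 ≤ m) :
    (PySem.Int.ofChars?
        (if (11 : Int) < PySem.List.len (PySem.Int.toChars m)
         then PySem.List.slice (PySem.Int.toChars m) (some (-(11:Int))) none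
         else PySem.Int.toChars m)).getD 0
      = m % 10 ^ 11 := by
  obtain ⟨a, rfl⟩ : ∃ a : Nat, m = (a : Int) := ⟨m.toNat, by omega⟩
  rcases Nat.eq_zero_or_pos a with rfl | hpos
  · decide
  · have hchars : PySem.Int.toChars (a : Int) = ((Nat.digits 10 a).map Nat.digitChar).reverse := by
      rw [PySem.Int.toChars]
      rw [if_neg (by omega)]
      have : (a : Int).toNat = a := by omega
      rw [this, toDigits_pos_eq a hpos]
    have hlen : (PySem.Int.toChars (a : Int)).length = (Nat.digits 10 a).length := by
      rw [hchars]; simp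
    -- the (possibly truncated) char list is always the last-11 digits, reversed
    have hkey : (if (11 : Int) < PySem.List.len (PySem.Int.toChars (a:Int))
         then PySem.List.slice (PySem.Int.toChars (a:Int)) (some (-(11:Int))) none
         else PySem.Int.toChars (a:Int))
        = (((Nat.digits 10 a).take 11).map Nat.digitChar).reverse := by
      by_cases hbig : (11 : Int) < PySem.List.len (PySem.Int.toChars (a:Int))
      · rw [if_pos hbig]
        rw [PySem.List.slice_from_neg_ofNat _ 11 (by norm_num)]
        rw [hchars]
        have hL : 11 ≤ (Nat.digits 10 a).length := by
          simp only [PySem.List.len_eq, hlen] at hbig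
          omega
        rw [List.drop_reverse]
        have h11 : (List.map Nat.digitChar (Nat.digits 10 a)).length -
            ((List.map Nat.digitChar (Nat.digits 10 a)).reverse.length - 11) = 11 := by
          simp; omega
        rw [h11, ← List.map_take]
      · rw [if_neg hbig]
        simp only [PySem.List.len_eq, hlen] at hbig
        rw [List.take_of_length_le (by omega), hchars]
    rw [hkey]
    -- parse it
    have hlen11 : ((Nat.digits 10 a).take 11) ≠ [] := by
      have := (Nat.digits_ne_nil_iff_ne_zero (b := 10)).mpr (by omega : a ≠ 0)
      simp [this]
    obtain ⟨d0, ds, hcons⟩ : ∃ d0 ds, (((Nat.digits 10 a).take 11).map Nat.digitChar).reverse = d0 :: ds := by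
      rcases h : (((Nat.digits 10 a).take 11).map Nat.digitChar).reverse with _ | ⟨d0, ds⟩
      · exfalso; apply hlen11; simpa using h
      · exact ⟨d0, ds, rfl⟩
    have hd10 : ∀ d ∈ (Nat.digits 10 a).take 11, d < 10 := by
      intro d hd
      exact Nat.digits_lt_base (by norm_num) (List.mem_of_mem_take hd)
    have halldig : ∀ x ∈ d0 :: ds, x.isDigit := by
      rw [← hcons]
      intro x hx
      rw [List.mem_reverse] at hx
      obtain ⟨d, hd, rfl⟩ := List.mem_map.mp hx
      exact digitChar_isDigit d (hd10 d hd)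
    rw [hcons, ofChars?_digits d0 ds halldig, ← hcons]
    rw [foldl_digitChars _ hd10 0]
    rw [← Nat.self_mod_pow_eq_ofDigits_take 11 a (by norm_num)]
    simp only [Option.getD_some, Nat.zero_mul, Nat.zero_add]
    omega

/-- A's fold keeps the invariant `acc = n ^ k % 10^11` -/
theorem foldA_eq (n : Int) (hn : 1 ≤ n) (l : List Int) (k : Nat) (acc : Int)
    (hacc : acc = n ^ k % 10 ^ 11) :
    l.foldl
      (fun num _ =>
        (PySem.Int.ofChars?
          (if (11 : Int) < PySem.List.len (PySem.Int.toChars (num * n))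
           then PySem.List.slice (PySem.Int.toChars (num * n)) (some (-(11:Int))) none
           else PySem.Int.toChars (num * n))).getD 0)
      acc
      = n ^ (k + l.length) % 10 ^ 11 := by
  induction l generalizing k acc with
  | nil => simpa using hacc
  | cons x t ih =>
    rw [List.foldl_cons]
    have hacc0 : 0 ≤ acc := by
      rw [hacc]; exact Int.emod_nonneg _ (by norm_num)
    rw [stepA_eq (acc * n) (mul_nonneg hacc0 (by omega))]
    have hstep : acc * n % 10 ^ 11 = n ^ (k + 1) % 10 ^ 11 := by
      rw [hacc, Int.mul_emod, Int.emod_emod_of_dvd _ (dvd_refl _), ← Int.mul_emod, ← pow_succ]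
    rw [ih (k + 1) _ hstep]
    simp only [List.length_cons]
    ring_nf

-- ===== VERDICT (by name: the statement is the Claim_ definition above) =====
theorem truncated_power_spec : Claim_equal_truncated_power := by
  intro n _
  unfold Spec_truncated_power truncated_power truncated_power_alt
  by_cases hn : n ≤ 0
  · rw [if_pos hn, PySem.List.pyRange_one_eq_nil hn]
    rfl
  · rw [if_neg hn]
    have h1 : 1 ≤ n := by omega
    simp only []
    rw [foldA_eq n h1 _ 0 1 (by
      rw [pow_zero, Int.emod_eq_of_lt (by norm_num) (by norm_num)])]
    rw [PySem.List.length_pyRange_one]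
    rw [PySem.Int.powMod, PySem.Int.mod_eq_emod_of_pos (by norm_num)]
    norm_num
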